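-- pv_equiv track=rewrite | github.com/haltosan/RA-python-tools | file_analysis.py | csvSplit
-- ===== SOURCE A (Python) =====
-- def csvSplit(text):
--     """converts csv string to list"""
--     texts = []
--     curString = ""
--     inString = False
--     for char in text:
--         if char == '"':
--             inString = not inString
--         if char == ',' and not inString:
--             texts.append(curString)
--             curString = ""
--         elif char != '"':  # TODO: figure out how to remove only the quotes that escape stuff, not literal quotes
--             curString += str(char)
--     texts.append(curString)
--     return texts
-- ===== SOURCE B (Python) =====
-- def csvSplit(text):
--     """converts csv string to list"""
--     fields = []
--     quotes = 0
--     start = 0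
--     for i, char in enumerate(text):
--         if char == '"':
--             quotes += 1
--         elif char == ',' and quotes % 2 == 0:
--             fields.append(text[start:i].replace('"', ''))
--             start = i + 1
--     fields.append(text[start:].replace('"', ''))
--     return fields
-- ===== Notes on version B (the rewrite author's own statement) =====
-- stated objective: alternative
-- what changed: B scans with enumerate keeping only a quote-parity counter and a start index, emitting each field as a slice text[start:i] with quotes stripped in bulk, instead of A's per-character string accumulator and boolean toggle.
import Mathlib
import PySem

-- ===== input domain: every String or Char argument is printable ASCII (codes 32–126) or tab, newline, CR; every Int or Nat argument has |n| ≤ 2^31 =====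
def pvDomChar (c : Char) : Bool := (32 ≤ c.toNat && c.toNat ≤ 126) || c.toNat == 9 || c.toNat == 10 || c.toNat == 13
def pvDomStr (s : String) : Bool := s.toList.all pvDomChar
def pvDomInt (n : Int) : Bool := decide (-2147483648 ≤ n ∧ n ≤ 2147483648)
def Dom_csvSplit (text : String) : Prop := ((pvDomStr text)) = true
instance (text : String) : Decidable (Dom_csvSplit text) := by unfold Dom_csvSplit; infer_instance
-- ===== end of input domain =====

-- B finds field boundaries by index with a quote-parity counter and strips quotes per
-- segment in bulk, instead of A's per-character accumulator; objective: alternative.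

-- ===== PORT A =====
-- A's loop: state (texts, curString, inString); curString kept as List Char, turned into
-- a String exactly where A appends it to the result list.
def csvSplitGoA (cs : List Char) (texts : List String) (cur : List Char) (inString : Bool) :
    List String :=
  match cs with
  | [] => texts ++ [String.ofList cur]
  | c :: rest =>
    let inString' := if c == '"' then !inString else inString
    if c == ',' && !inString' then
      csvSplitGoA rest (texts ++ [String.ofList cur]) [] inString'
    else if c != '"' then
      csvSplitGoA rest texts (cur ++ [c]) inString'
    else
      csvSplitGoA rest texts cur inString'

def csvSplit (text : String) : List String :=
  csvSplitGoA text.toList [] [] false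

-- ===== PORT B =====
-- s.replace('"', '') ported by hand: deleting every occurrence of one character is
-- exactly a filter (exact on all inputs).
def stripQuotes (cs : List Char) : List Char := cs.filter (fun c => c ≠ '"')

-- B's loop: enumerate(text) with state (fields, quotes, start); text[start:i] is
-- (drop start).take (i - start), exact here since 0 ≤ start ≤ i ≤ len(text).
def csvSplitGoB (text : List Char) (cs : List Char) (i : Nat) (fields : List String)
    (quotes : Nat) (start : Nat) : List String :=
  match cs with
  | [] => fields ++ [String.ofList (stripQuotes (text.drop start))]
  | c :: rest =>
    if c == '"' then
      csvSplitGoB text rest (i + 1) fields (quotes + 1) start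
    else if c == ',' && quotes % 2 == 0 then
      csvSplitGoB text rest (i + 1)
        (fields ++ [String.ofList (stripQuotes ((text.drop start).take (i - start)))])
        quotes (i + 1)
    else
      csvSplitGoB text rest (i + 1) fields quotes start

def csvSplit_alt (text : String) : List String :=
  csvSplitGoB text.toList text.toList 0 [] 0 0

-- ===== PRECONDITION & SPEC =====
def Spec_csvSplit (text : String) (out : List String) : Prop := out = csvSplit_alt text
instance (text : String) (out : List String) : Decidable (Spec_csvSplit text out) := by unfold Spec_csvSplit; infer_instance

-- ===== CLAIM (what is proved, stated in full; the proofs are below) =====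
def Claim_equal_csvSplit : Prop := ∀ (text : String), Dom_csvSplit text → Spec_csvSplit text (csvSplit text)

-- ===== LEMMAS AND PROOFS =====

lemma stripQuotes_append (a b : List Char) :
    stripQuotes (a ++ b) = stripQuotes a ++ stripQuotes b := by
  simp [stripQuotes]

-- Invariant linking the two loops: with text = p ++ cs, i = p.length, start ≤ p.length,
-- A's accumulator is the quote-stripped tail of p from start, and inString is the
-- parity of B's quote counter.
lemma go_eq (cs : List Char) :
    ∀ (p : List Char) (texts : List String) (quotes start : Nat),
      start ≤ p.length →
      csvSplitGoA cs texts (stripQuotes (p.drop start)) (quotes % 2 == 1)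
        = csvSplitGoB (p ++ cs) cs p.length texts quotes start := by
  induction cs with
  | nil =>
    intro p texts quotes start h
    simp [csvSplitGoA, csvSplitGoB]
  | cons c rest ih =>
    intro p texts quotes start h
    by_cases hq : c = '"'
    · subst hq
      have h1 : csvSplitGoB (p ++ '"' :: rest) ('"' :: rest) p.length texts quotes start
          = csvSplitGoB (p ++ '"' :: rest) rest (p.length + 1) texts (quotes + 1) start := by
        simp [csvSplitGoB]
      have h2 : p ++ '"' :: rest = (p ++ ['"']) ++ rest := by simp
      have h3 : stripQuotes ((p ++ ['"']).drop start) = stripQuotes (p.drop start) := by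
        rw [List.drop_append_of_le_length h, stripQuotes_append]
        simp [stripQuotes]
      have h4 : ((quotes + 1) % 2 == 1) = !(quotes % 2 == 1) := by
        rcases Nat.mod_two_eq_zero_or_one quotes with h0 | h0 <;>
          simp [Nat.add_mod, h0]
      rw [h1, h2]
      have := ih (p ++ ['"']) texts (quotes + 1) start (by simp; omega)
      rw [List.length_append] at this
      simp only [List.length_cons, List.length_nil] at this
      rw [h3] at this
      rw [← this]
      simp [csvSplitGoA, h4]
    · by_cases hc : c = ',' ∧ quotes % 2 = 0
      · obtain ⟨hc1, hc2⟩ := hc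
        subst hc1
        have hB : csvSplitGoB (p ++ ',' :: rest) (',' :: rest) p.length texts quotes start
            = csvSplitGoB (p ++ ',' :: rest) rest (p.length + 1)
                (texts ++ [String.ofList (stripQuotes (((p ++ ',' :: rest).drop start).take (p.length - start)))])
                quotes (p.length + 1) := by
          simp [csvSplitGoB, hc2]
        have hslice : ((p ++ ',' :: rest).drop start).take (p.length - start) = p.drop start := by
          rw [List.drop_append_of_le_length h, List.take_append_of_le_length (by simp)]
          simp
        have h2 : p ++ ',' :: rest = (p ++ [',']) ++ rest := by simp
        have hdrop : (p ++ [',']).drop (p.length + 1) = [] := by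
          apply List.drop_eq_nil_of_le; simp
        rw [hB, hslice, h2]
        have := ih (p ++ [',']) (texts ++ [String.ofList (stripQuotes (p.drop start))]) quotes
          (p.length + 1) (by simp)
        rw [List.length_append] at this
        simp only [List.length_cons, List.length_nil] at this
        rw [hdrop] at this
        rw [← this]
        simp [csvSplitGoA, stripQuotes, hc2]
      · -- ordinary character: c ≠ '"' and not a splitting comma
        have hA : csvSplitGoA (c :: rest) texts (stripQuotes (p.drop start)) (quotes % 2 == 1)
            = csvSplitGoA rest texts (stripQuotes (p.drop start) ++ [c]) (quotes % 2 == 1) := by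
          by_cases hcomma : c = ','
          · subst hcomma
            have : quotes % 2 = 1 := by
              rcases Nat.mod_two_eq_zero_or_one quotes with h0 | h1
              · exact absurd ⟨rfl, h0⟩ hc
              · exact h1
            simp [csvSplitGoA, this]
          · simp [csvSplitGoA, hq, hcomma]
        have hB : csvSplitGoB (p ++ c :: rest) (c :: rest) p.length texts quotes start
            = csvSplitGoB (p ++ c :: rest) rest (p.length + 1) texts quotes start := by
          by_cases hcomma : c = ','
          · subst hcomma
            have h1 : quotes % 2 = 1 := by
              rcases Nat.mod_two_eq_zero_or_one quotes with h0 | h1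
              · exact absurd ⟨rfl, h0⟩ hc
              · exact h1
            simp [csvSplitGoB, h1]
          · simp [csvSplitGoB, hq, hcomma]
        have h2 : p ++ c :: rest = (p ++ [c]) ++ rest := by simp
        have h3 : stripQuotes ((p ++ [c]).drop start) = stripQuotes (p.drop start) ++ [c] := by
          rw [List.drop_append_of_le_length h, stripQuotes_append]
          simp [stripQuotes, hq]
        rw [hA, hB, h2]
        have := ih (p ++ [c]) texts quotes start (by simp; omega)
        rw [List.length_append] at this
        simp only [List.length_cons, List.length_nil] at this
        rw [h3] at this
        exact this

-- ===== VERDICT (by name: the statement is the Claim_ definition above) =====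
theorem csvSplit_spec : Claim_equal_csvSplit := by
  intro text _
  unfold Spec_csvSplit csvSplit csvSplit_alt
  have := go_eq text.toList [] [] 0 0 (by simp)
  simpa [stripQuotes] using this
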